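-- pv_equiv track=rewrite | github.com/nicholsl/PythonProjects | weatherstats.py | extremetemps
-- ===== SOURCE A (Python) =====
-- def extremetemps(listOfLists):
-- 	max = listOfLists[0][1]
-- 	min = listOfLists[0][1]
-- 	maxyear = []
-- 	minyear = []
-- 	for eachyear in listOfLists:
-- 		for temperature in eachyear[1:]:
-- 			if temperature > max:
-- 				max = temperature
-- 			elif temperature < min:
-- 				min = temperature
-- 	for eachyear in listOfLists:
-- 		for temperature in eachyear[1:]:
-- 			if temperature == max:
-- 				maxyear.append(eachyear[0])
-- 			elif temperature == min:
-- 				minyear.append(eachyear[0])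
--
-- 	return (max, maxyear, min, minyear)
-- ===== SOURCE B (Python) =====
-- def extremetemps(listOfLists):
--     hi = lo = listOfLists[0][1]
--     maxyear = []
--     minyear = []
--     for row in listOfLists:
--         for t in row[1:]:
--             if t > hi:
--                 if hi == lo:
--                     # max and min split apart: the shared labels are the minimum's
--                     minyear = maxyear
--                 maxyear = [row[0]]
--                 hi = t
--             elif t < lo:
--                 minyear = [row[0]]
--                 lo = t
--             elif t == hi:
--                 maxyear.append(row[0])
--             elif t == lo:
--                 minyear.append(row[0])
--     return (hi, maxyear, lo, minyear)
-- ===== Notes on version B (the rewrite author's own statement) =====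
-- stated objective: alternative
-- what changed: Fuses A's two dependent sweeps (a running max/min pass followed by a full collection sweep) into a single streaming pass that maintains the extremes together with their label lists, resetting a list when its extreme is displaced and handing the shared list over to minyear at the moment the maximum first splits away from the minimum.
import Mathlib
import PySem

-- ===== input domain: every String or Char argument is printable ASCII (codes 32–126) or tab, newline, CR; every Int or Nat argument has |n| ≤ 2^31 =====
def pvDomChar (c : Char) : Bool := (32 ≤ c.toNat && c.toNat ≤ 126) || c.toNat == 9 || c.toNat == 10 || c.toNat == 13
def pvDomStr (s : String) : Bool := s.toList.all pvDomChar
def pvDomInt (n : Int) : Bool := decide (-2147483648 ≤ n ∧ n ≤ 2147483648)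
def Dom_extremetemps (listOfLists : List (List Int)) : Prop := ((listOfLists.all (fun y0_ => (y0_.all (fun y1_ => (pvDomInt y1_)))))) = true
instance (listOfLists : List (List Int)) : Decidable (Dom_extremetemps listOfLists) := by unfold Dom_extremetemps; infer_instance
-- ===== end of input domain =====

-- B fuses A's two dependent sweeps into one streaming pass that keeps the extremes together
-- with their label lists (resetting/handing over a list when an extreme is displaced);
-- objective: alternative (same cost, different decomposition).

-- ===== PORT A =====
-- literal transliteration of A: two nested-loop passes; `listOfLists[0][1]` is pyGet?
-- (none = IndexError, excluded by Pre_); `eachyear[1:]` is slice 1 none; `eachyear[0]`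
-- is pyGetD (only evaluated when eachyear[1:] is nonempty, so the default is never used).
def extremetemps (listOfLists : List (List Int)) : Int × List Int × Int × List Int :=
  match (PySem.List.pyGet? listOfLists 0).bind (fun r => PySem.List.pyGet? r 1) with
  | none => (0, [], 0, [])
  | some t0 =>
    let p1 := listOfLists.foldl (fun (q : Int × Int) eachyear =>
      (PySem.List.slice eachyear (some 1) none).foldl (fun (q : Int × Int) t =>
        if t > q.1 then (t, q.2) else if t < q.2 then (q.1, t) else q) q) (t0, t0)
    let p2 := listOfLists.foldl (fun (q : List Int × List Int) eachyear =>
      (PySem.List.slice eachyear (some 1) none).foldl (fun (q : List Int × List Int) t =>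
        if t = p1.1 then (q.1 ++ [PySem.List.pyGetD eachyear 0 0], q.2)
        else if t = p1.2 then (q.1, q.2 ++ [PySem.List.pyGetD eachyear 0 0]) else q) q) ([], [])
    (p1.1, p2.1, p1.2, p2.2)

-- ===== PORT B =====
-- literal transliteration of Source B: one streaming pass with state (hi, maxyear, lo, minyear);
-- `row[1:]` is slice 1 none, `row[0]` is pyGetD (only evaluated when the inner loop runs).
-- The Python `if hi == lo: minyear = maxyear` before rebinding maxyear is the inner `if`
-- (all four state components are updated from the pre-step values, as in Python).
def extremetemps_alt (listOfLists : List (List Int)) : Int × List Int × Int × List Int :=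
  match (PySem.List.pyGet? listOfLists 0).bind (fun r => PySem.List.pyGet? r 1) with
  | none => (0, [], 0, [])
  | some t0 =>
    listOfLists.foldl (fun (q : Int × List Int × Int × List Int) row =>
      (PySem.List.slice row (some 1) none).foldl (fun (q : Int × List Int × Int × List Int) t =>
        if t > q.1 then
          (t, [PySem.List.pyGetD row 0 0], q.2.2.1, if q.1 == q.2.2.1 then q.2.1 else q.2.2.2)
        else if t < q.2.2.1 then
          (q.1, q.2.1, t, [PySem.List.pyGetD row 0 0])
        else if t == q.1 then
          (q.1, q.2.1 ++ [PySem.List.pyGetD row 0 0], q.2.2.1, q.2.2.2)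
        else if t == q.2.2.1 then
          (q.1, q.2.1, q.2.2.1, q.2.2.2 ++ [PySem.List.pyGetD row 0 0])
        else q) q) (t0, [], t0, [])

-- ===== PRECONDITION & SPEC =====
-- Pre_ excludes exactly the inputs where both Pythons raise IndexError on `listOfLists[0][1]`
-- (empty outer list, or a first row with fewer than two entries).
def Pre_extremetemps (listOfLists : List (List Int)) : Prop :=
  listOfLists ≠ [] ∧ 2 ≤ (listOfLists.headI).length
instance (listOfLists : List (List Int)) : Decidable (Pre_extremetemps listOfLists) := by
  unfold Pre_extremetemps; infer_instance

def pvWitness_extremetemps : List (List Int) := [[1995, 5, 3], [1996, 7]]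

def Spec_extremetemps (listOfLists : List (List Int)) (out : Int × List Int × Int × List Int) : Prop := out = extremetemps_alt listOfLists
instance (listOfLists : List (List Int)) (out : Int × List Int × Int × List Int) : Decidable (Spec_extremetemps listOfLists out) := by unfold Spec_extremetemps; infer_instance

-- ===== CLAIM (what is proved, stated in full; the proofs are below) =====
def Claim_equal_extremetemps : Prop := ∀ (listOfLists : List (List Int)), Dom_extremetemps listOfLists → Pre_extremetemps listOfLists → Spec_extremetemps listOfLists (extremetemps listOfLists)

-- ===== LEMMAS AND PROOFS =====

-- A's first pass, flattened: with min ≤ max it is the running max/min fold.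
lemma pass1_flat (l : List Int) (a b : Int) (h : b ≤ a) :
    l.foldl (fun (q : Int × Int) t =>
        if t > q.1 then (t, q.2) else if t < q.2 then (q.1, t) else q) (a, b)
      = (l.foldl max a, l.foldl min b) := by
  induction l generalizing a b with
  | nil => simp
  | cons x xs ih =>
    simp only [List.foldl_cons]
    split_ifs with h1 h2
    · rw [show max a x = x from max_eq_right (le_of_lt h1),
          show min b x = b from min_eq_left (by omega)]
      exact ih x b (by omega)
    · rw [show max a x = a from max_eq_left (by omega),
          show min b x = x from min_eq_right (le_of_lt h2)]
      exact ih a x (by omega)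
    · rw [show max a x = a from max_eq_left (by omega),
          show min b x = b from min_eq_left (by omega)]
      exact ih a b h

-- A's second pass, flattened per row: conditional appends are filters.
lemma pass2_flat (l : List Int) (M m c : Int) (acc : List Int × List Int) :
    l.foldl (fun (q : List Int × List Int) t =>
        if t = M then (q.1 ++ [c], q.2)
        else if t = m then (q.1, q.2 ++ [c]) else q) acc
      = (acc.1 ++ (l.filter (fun t => t == M)).map (fun _ => c),
         acc.2 ++ (l.filter (fun t => !(t == M) && t == m)).map (fun _ => c)) := by
  induction l generalizing acc with
  | nil => simp
  | cons x xs ih =>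
    simp only [List.foldl_cons, List.filter_cons]
    by_cases h1 : x = M
    · subst h1; simp [ih]
    · by_cases h2 : x = m
      · subst h2; simp [h1, ih]
      · simp [h1, h2, ih]

-- A's second pass over all rows, as a flatMap.
lemma pass2_outer (rows : List (List Int)) (M m : Int) (acc : List Int × List Int) :
    rows.foldl (fun (q : List Int × List Int) eachyear =>
        (eachyear.tail).foldl (fun (q : List Int × List Int) t =>
          if t = M then (q.1 ++ [PySem.List.pyGetD eachyear 0 0], q.2)
          else if t = m then (q.1, q.2 ++ [PySem.List.pyGetD eachyear 0 0]) else q) q) acc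
      = (acc.1 ++ rows.flatMap (fun row =>
            ((row.tail).filter (fun t => t == M)).map (fun _ => PySem.List.pyGetD row 0 0)),
         acc.2 ++ rows.flatMap (fun row =>
            ((row.tail).filter (fun t => !(t == M) && t == m)).map (fun _ => PySem.List.pyGetD row 0 0))) := by
  induction rows generalizing acc with
  | nil => simp
  | cons r rs ih =>
    simp only [List.foldl_cons, List.flatMap_cons]
    rw [pass2_flat, ih]
    simp [List.append_assoc]

-- B's streaming step, as a function of a (temperature, label) pair.
def bStep (q : Int × List Int × Int × List Int) (p : Int × Int) : Int × List Int × Int × List Int :=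
  if p.1 > q.1 then (p.1, [p.2], q.2.2.1, if q.1 == q.2.2.1 then q.2.1 else q.2.2.2)
  else if p.1 < q.2.2.1 then (q.1, q.2.1, p.1, [p.2])
  else if p.1 == q.1 then (q.1, q.2.1 ++ [p.2], q.2.2.1, q.2.2.2)
  else if p.1 == q.2.2.1 then (q.1, q.2.1, q.2.2.1, q.2.2.2 ++ [p.2])
  else q

-- B's nested loop, flattened to a single fold over the (temperature, label) pairs.
lemma b_flat (rows : List (List Int)) (q : Int × List Int × Int × List Int) :
    rows.foldl (fun q row =>
        (row.tail).foldl (fun q t => bStep q (t, PySem.List.pyGetD row 0 0)) q) q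
      = (rows.flatMap (fun row => (row.tail).map (fun t => (t, PySem.List.pyGetD row 0 0)))).foldl bStep q := by
  induction rows generalizing q with
  | nil => simp
  | cons r rs ih =>
    simp only [List.foldl_cons, List.flatMap_cons, List.foldl_append, List.foldl_map]
    exact ih _

-- The streaming invariant: after any prefix, B's state is the extremes of the temperatures
-- seen so far (seeded with t0) together with exactly the label lists A's collection pass
-- would produce for those extremes.
lemma loop_closed (t0 : Int) (xs : List (Int × Int)) :
    xs.foldl bStep (t0, [], t0, [])
      = ((xs.map Prod.fst).foldl max t0,
         (xs.filter (fun p => p.1 == (xs.map Prod.fst).foldl max t0)).map Prod.snd,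
         (xs.map Prod.fst).foldl min t0,
         (xs.filter (fun p => !(p.1 == (xs.map Prod.fst).foldl max t0)
                              && p.1 == (xs.map Prod.fst).foldl min t0)).map Prod.snd) := by
  induction xs using List.reverseRecOn with
  | nil => simp
  | append_singleton xs p ih =>
    set H := (xs.map Prod.fst).foldl max t0 with hH
    set Lo := (xs.map Prod.fst).foldl min t0 with hLo
    have hLoH : Lo ≤ H :=
      le_trans (PySem.List.foldl_min_le (xs.map Prod.fst) t0).1
               (PySem.List.le_foldl_max (xs.map Prod.fst) t0).1
    have hub : ∀ q ∈ xs, q.1 ≤ H := fun q hq =>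
      (PySem.List.le_foldl_max (xs.map Prod.fst) t0).2 q.1 (List.mem_map.2 ⟨q, hq, rfl⟩)
    have hlb : ∀ q ∈ xs, Lo ≤ q.1 := fun q hq =>
      (PySem.List.foldl_min_le (xs.map Prod.fst) t0).2 q.1 (List.mem_map.2 ⟨q, hq, rfl⟩)
    have hHA : ((xs ++ [p]).map Prod.fst).foldl max t0 = max H p.1 := by
      simp [hH]
    have hLoA : ((xs ++ [p]).map Prod.fst).foldl min t0 = min Lo p.1 := by
      simp [hLo]
    rw [List.foldl_append, ih, List.foldl_cons, List.foldl_nil, hHA, hLoA]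
    unfold bStep
    by_cases h1 : p.1 > H
    · rw [if_pos h1]
      have hmax : max H p.1 = p.1 := max_eq_right (le_of_lt h1)
      have hmin : min Lo p.1 = Lo := min_eq_left (by omega)
      rw [hmax, hmin]
      refine Prod.ext rfl (Prod.ext ?_ (Prod.ext rfl ?_))
      · -- maxyear: old hits are all below p.1
        have hnil : xs.filter (fun q => q.1 == p.1) = [] :=
          List.filter_eq_nil_iff.2 (fun q hq => by
            have := hub q hq; simp; omega)
        simp [List.filter_append, hnil]
      · -- minyear: the shared list is handed over iff H = Lo
        have hpfalse : (!(p.1 == p.1) && p.1 == Lo) = false := by simp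
        by_cases h2 : H = Lo
        · rw [if_pos (by simp [h2])]
          have hcong : xs.filter (fun q => !(q.1 == p.1) && q.1 == Lo)
              = xs.filter (fun q => q.1 == H) := by
            refine List.filter_congr ?_
            intro q hq
            have hqH := hub q hq
            by_cases hqLo : q.1 = Lo
            · have : (q.1 == p.1) = false := beq_eq_false_iff_ne.2 (by omega)
              simp [hqLo, h2]
              omega
            · have : (q.1 == Lo) = false := beq_eq_false_iff_ne.2 hqLo
              have h2' : (q.1 == H) = false := beq_eq_false_iff_ne.2 (by omega)
              simp [this, h2']
          simp [List.filter_append, hcong]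
        · rw [if_neg (by simp [h2])]
          have hcong : xs.filter (fun q => !(q.1 == p.1) && q.1 == Lo)
              = xs.filter (fun q => !(q.1 == H) && q.1 == Lo) := by
            refine List.filter_congr ?_
            intro q hq
            have hqH := hub q hq
            by_cases hqLo : q.1 = Lo
            · have ha : (q.1 == p.1) = false := beq_eq_false_iff_ne.2 (by omega)
              have hb : (q.1 == H) = false := beq_eq_false_iff_ne.2 (by omega)
              simp [hqLo]
              exact iff_of_false (by omega) (by omega)
            · have : (q.1 == Lo) = false := beq_eq_false_iff_ne.2 hqLo
              simp [this]
          simp [List.filter_append, hcong]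
    · rw [if_neg h1]
      by_cases h2 : p.1 < Lo
      · rw [if_pos h2]
        have hmax : max H p.1 = H := max_eq_left (by omega)
        have hmin : min Lo p.1 = p.1 := min_eq_right (by omega)
        rw [hmax, hmin]
        refine Prod.ext rfl (Prod.ext ?_ (Prod.ext rfl ?_))
        · have hp : (p.1 == H) = false := beq_eq_false_iff_ne.2 (by omega)
          simp [List.filter_append, hp]
        · have hnil : xs.filter (fun q => !(q.1 == H) && q.1 == p.1) = [] :=
            List.filter_eq_nil_iff.2 (fun q hq => by
              have := hlb q hq
              have : (q.1 == p.1) = false := beq_eq_false_iff_ne.2 (by omega)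
              simp [this])
          have hpH : (p.1 == H) = false := beq_eq_false_iff_ne.2 (by omega)
          simp [List.filter_append, hnil, hpH]
      · rw [if_neg h2]
        by_cases h3 : p.1 = H
        · rw [if_pos (by simp [h3])]
          have hmax : max H p.1 = H := max_eq_left (by omega)
          have hmin : min Lo p.1 = Lo := min_eq_left (by omega)
          rw [hmax, hmin]
          refine Prod.ext rfl (Prod.ext ?_ (Prod.ext rfl ?_))
          · simp [List.filter_append, h3]
          · have hp : (!(p.1 == H) && p.1 == Lo) = false := by simp [h3]
            simp [List.filter_append, hp]
        · rw [if_neg (by simp [h3])]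
          by_cases h4 : p.1 = Lo
          · rw [if_pos (by simp [h4])]
            have hmax : max H p.1 = H := max_eq_left (by omega)
            have hmin : min Lo p.1 = Lo := min_eq_left (by omega)
            rw [hmax, hmin]
            refine Prod.ext rfl (Prod.ext ?_ (Prod.ext rfl ?_))
            · have hp : (p.1 == H) = false := beq_eq_false_iff_ne.2 h3
              simp [List.filter_append, hp]
            · have hp : (!(p.1 == H) && p.1 == Lo) = true := by
                simp [h4]
                omega
              simp [List.filter_append, hp]
          · rw [if_neg (by simp [h4])]
            have hmax : max H p.1 = H := max_eq_left (by omega)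
            have hmin : min Lo p.1 = Lo := min_eq_left (by omega)
            rw [hmax, hmin]
            refine Prod.ext rfl (Prod.ext ?_ (Prod.ext rfl ?_))
            · simp [List.filter_append, beq_eq_false_iff_ne.2 h3]
            · simp [List.filter_append, beq_eq_false_iff_ne.2 h4]

theorem extremetemps_spec : Claim_equal_extremetemps := by
  intro L _hDom hPre
  obtain ⟨hne, hlen⟩ := hPre
  obtain ⟨r0, rest, rfl⟩ := List.exists_cons_of_ne_nil hne
  simp only [List.headI] at hlen
  obtain ⟨a0, r0', rfl⟩ := List.exists_cons_of_ne_nil (l := r0) (by rintro rfl; simp at hlen)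
  obtain ⟨t0, rs, rfl⟩ := List.exists_cons_of_ne_nil (l := r0') (by rintro rfl; simp at hlen)
  show extremetemps _ = extremetemps_alt _
  set L := (a0 :: t0 :: rs) :: rest with hL
  set T : List Int := rs ++ rest.flatMap List.tail with hT
  have hflatT : L.flatMap List.tail = t0 :: T := by simp [hL, hT]
  set ps : List (Int × Int) :=
    L.flatMap (fun row => (row.tail).map (fun t => (t, PySem.List.pyGetD row 0 0))) with hps
  have hpsfst : ps.map Prod.fst = t0 :: T := by
    rw [hps, List.map_flatMap, ← hflatT]
    refine List.flatMap_congr ?_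
    intro row _
    simp [List.map_map, Function.comp_def]
  have hget : (PySem.List.pyGet? L 0).bind (fun r => PySem.List.pyGet? r 1) = some t0 := by
    simp [hL, PySem.List.pyGet?, PySem.List.pyIdx?]
  have hp1 : List.foldl (fun (q : Int × Int) eachyear =>
        (PySem.List.slice eachyear (some 1) none).foldl (fun (q : Int × Int) t =>
          if t > q.1 then (t, q.2) else if t < q.2 then (q.1, t) else q) q)
        (t0, t0) L = (T.foldl max t0, T.foldl min t0) := by
    simp only [PySem.List.slice_from_one]
    rw [← List.foldl_flatMap, hflatT]
    simp only [List.foldl_cons]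
    rw [if_neg (by omega), if_neg (by omega)]
    exact pass1_flat _ _ _ le_rfl
  have hmaxps : (ps.map Prod.fst).foldl max t0 = T.foldl max t0 := by
    rw [hpsfst, List.foldl_cons, max_self]
  have hminps : (ps.map Prod.fst).foldl min t0 = T.foldl min t0 := by
    rw [hpsfst, List.foldl_cons, min_self]
  -- B's loop, flattened and closed
  have hB : extremetemps_alt L
      = (T.foldl max t0,
         (ps.filter (fun p => p.1 == T.foldl max t0)).map Prod.snd,
         T.foldl min t0,
         (ps.filter (fun p => !(p.1 == T.foldl max t0) && p.1 == T.foldl min t0)).map Prod.snd) := by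
    show (match (PySem.List.pyGet? L 0).bind (fun r => PySem.List.pyGet? r 1) with
      | none => ((0 : Int), ([] : List Int), (0 : Int), ([] : List Int))
      | some t0 =>
        L.foldl (fun (q : Int × List Int × Int × List Int) row =>
          (PySem.List.slice row (some 1) none).foldl (fun (q : Int × List Int × Int × List Int) t =>
            if t > q.1 then
              (t, [PySem.List.pyGetD row 0 0], q.2.2.1, if q.1 == q.2.2.1 then q.2.1 else q.2.2.2)
            else if t < q.2.2.1 then
              (q.1, q.2.1, t, [PySem.List.pyGetD row 0 0])
            else if t == q.1 then
              (q.1, q.2.1 ++ [PySem.List.pyGetD row 0 0], q.2.2.1, q.2.2.2)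
            else if t == q.2.2.1 then
              (q.1, q.2.1, q.2.2.1, q.2.2.2 ++ [PySem.List.pyGetD row 0 0])
            else q) q) (t0, [], t0, [])) = _
    rw [hget]
    simp only [PySem.List.slice_from_one]
    have : L.foldl (fun q row =>
        (row.tail).foldl (fun q t => bStep q (t, PySem.List.pyGetD row 0 0)) q) (t0, [], t0, [])
      = ps.foldl bStep (t0, [], t0, []) := b_flat L (t0, [], t0, [])
    rw [show (fun (q : Int × List Int × Int × List Int) row =>
        (row.tail : List Int).foldl (fun q t =>
          if t > q.1 then
            (t, [PySem.List.pyGetD row 0 0], q.2.2.1, if q.1 == q.2.2.1 then q.2.1 else q.2.2.2)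
          else if t < q.2.2.1 then
            (q.1, q.2.1, t, [PySem.List.pyGetD row 0 0])
          else if t == q.1 then
            (q.1, q.2.1 ++ [PySem.List.pyGetD row 0 0], q.2.2.1, q.2.2.2)
          else if t == q.2.2.1 then
            (q.1, q.2.1, q.2.2.1, q.2.2.2 ++ [PySem.List.pyGetD row 0 0])
          else q) q)
      = (fun (q : Int × List Int × Int × List Int) row =>
        (row.tail).foldl (fun q t => bStep q (t, PySem.List.pyGetD row 0 0)) q) from rfl]
    rw [this, loop_closed, hmaxps, hminps]
  -- assemble both sides
  rw [hB]
  simp only [extremetemps, hget, hp1]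
  simp only [PySem.List.slice_from_one, pass2_outer, List.nil_append]
  refine Prod.ext rfl (Prod.ext ?_ (Prod.ext rfl ?_))
  · rw [hps]
    simp only [List.filter_flatMap, List.map_flatMap, List.filter_map, List.map_map]
    rfl
  · rw [hps]
    simp only [List.filter_flatMap, List.map_flatMap, List.filter_map, List.map_map]
    rfl
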